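-- pv_equiv track=rewrite | github.com/sachinagada/CS-112---Fundamentals-of-Programming-and-Computer-Science | HW 6/HW 6.py | checkDuplicity2
-- ===== SOURCE A (Python) =====
-- def checkDuplicity2(a):
--     (rows,cols) = (len(a), len(a[0]))
--     resultset = set()
--     for row in range(rows):
--         for col in range(cols):
--             resultset.add(a[row][col]) #adds to set to see if unique element
--     if 0 in resultset:
--         return False # can't have 0's in King's Tour
--     if len(resultset) == rows*cols: #
--         return True #returns True if no duplicates
--     return False #False if there are duplicates
-- ===== SOURCE B (Python) =====
-- def checkDuplicity2(a):
--     cols = len(a[0])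
--     vals = sorted(row[c] for row in a for c in range(cols))
--     return 0 not in vals and all(x < y for x, y in zip(vals, vals[1:]))
-- ===== Notes on version B (the rewrite author's own statement) =====
-- stated objective: alternative
-- what changed: Replaces A's hash-set accumulation plus final 0-membership and size-vs-rows*cols comparison by sort-then-scan: collect the rows*cols board values, sort them, and return True iff 0 is absent and every adjacent sorted pair is strictly increasing.
import Mathlib
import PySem

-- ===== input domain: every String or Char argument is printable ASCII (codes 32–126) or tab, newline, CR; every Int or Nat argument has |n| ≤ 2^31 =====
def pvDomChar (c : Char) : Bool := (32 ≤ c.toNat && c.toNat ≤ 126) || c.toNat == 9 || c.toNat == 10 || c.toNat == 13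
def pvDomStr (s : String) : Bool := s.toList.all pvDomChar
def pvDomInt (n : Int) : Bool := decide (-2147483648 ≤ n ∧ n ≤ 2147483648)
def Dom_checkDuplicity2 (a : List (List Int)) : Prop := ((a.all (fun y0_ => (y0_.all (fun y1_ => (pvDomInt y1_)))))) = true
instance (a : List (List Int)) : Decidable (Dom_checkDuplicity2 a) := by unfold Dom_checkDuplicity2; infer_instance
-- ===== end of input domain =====

-- B replaces A's "fill a hash set, then test 0-membership and compare set size with
-- rows*cols" by sort-then-scan: sort the rows*cols board values and return True iff 0 is
-- absent and every adjacent sorted pair is strictly increasing (objective: alternative).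

-- ===== PORT A =====
def checkDuplicity2 (a : List (List Int)) : Bool :=
  -- (rows, cols) = (len(a), len(a[0])); the a[0] IndexError on the empty list is excluded by Pre_
  let rows : Int := PySem.List.len a
  let cols : Int := PySem.List.len ((PySem.List.pyGet? a 0).getD [])
  let resultset : PySem.Set Int :=
    (PySem.List.pyRange 0 rows 1).foldl (fun s row =>
      (PySem.List.pyRange 0 cols 1).foldl (fun s col =>
        PySem.Set.add s (PySem.List.pyGetD (PySem.List.pyGetD a row []) col 0)) s)
      PySem.Set.empty
  if PySem.Set.contains resultset 0 then false
  else if PySem.Set.len resultset = rows * cols then true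
  else false

-- ===== PORT B =====
def checkDuplicity2_alt (a : List (List Int)) : Bool :=
  -- cols = len(a[0]); vals = sorted(row[c] for row in a for c in range(cols))
  let cols : Int := PySem.List.len ((PySem.List.pyGet? a 0).getD [])
  let vals : List Int :=
    PySem.List.sorted
      (a.flatMap (fun row =>
        (PySem.List.pyRange 0 cols 1).map (fun c => PySem.List.pyGetD row c 0)))
      (fun x => x) false
  -- 0 not in vals and all(x < y for x, y in zip(vals, vals[1:]))
  (! vals.contains 0) &&
    (vals.zip (PySem.List.slice vals (some 1) none)).all (fun p => decide (p.1 < p.2))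

-- ===== PRECONDITION & SPEC =====
-- Pre_ is exactly A's return domain: A raises IndexError on the empty input (at a[0]) and on
-- inputs with a row shorter than the first row (at a[row][col]); B raises there too.
def Pre_checkDuplicity2 (a : List (List Int)) : Prop :=
  a ≠ [] ∧ ∀ r ∈ a, (a.headD []).length ≤ r.length
instance (a : List (List Int)) : Decidable (Pre_checkDuplicity2 a) := by
  unfold Pre_checkDuplicity2; infer_instance

def pvWitness_checkDuplicity2 : List (List Int) := [[1, 2], [3, 4]]

def Spec_checkDuplicity2 (a : List (List Int)) (out : Bool) : Prop := out = checkDuplicity2_alt a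
instance (a : List (List Int)) (out : Bool) : Decidable (Spec_checkDuplicity2 a out) := by unfold Spec_checkDuplicity2; infer_instance

-- ===== CLAIM (what is proved, stated in full; the proofs are below) =====
def Claim_equal_checkDuplicity2 : Prop := ∀ (a : List (List Int)), Dom_checkDuplicity2 a → Pre_checkDuplicity2 a → Spec_checkDuplicity2 a (checkDuplicity2 a)

-- ===== LEMMAS AND PROOFS =====

-- folding Set.update over the truncated rows collects their flattening
theorem foldl_update_flatten (a : List (List Int)) (s : PySem.Set Int) :
    a.foldl (fun s r => PySem.Set.update s r) s = PySem.Set.update s a.flatten := by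
  induction a generalizing s with
  | nil => simp [PySem.Set.update]
  | cons r rs ih =>
      simp only [List.foldl_cons, List.flatten_cons]
      rw [ih, PySem.Set.update_append]

-- A's inner loop over range(cols) on a row of length ≥ cols collects row[:cols]
theorem inner_fold_eq (r : List Int) (c : Nat) (hc : c ≤ r.length) (s : PySem.Set Int) :
    (PySem.List.pyRange 0 (c : Int) 1).foldl
      (fun s col => PySem.Set.add s (PySem.List.pyGetD r col 0)) s =
    PySem.Set.update s (r.take c) := by
  have htlen : (r.take c).length = c := by simp [List.length_take]; omega
  rw [PySem.List.foldl_congr_mem _ _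
    (fun s col => PySem.Set.add s (PySem.List.pyGetD (r.take c) col 0)) s]
  · have hcast : (c : Int) = ((r.take c).length : Int) := by rw [htlen]
    rw [hcast, PySem.List.foldl_pyRange_zero_pyGetD' (r.take c) 0 PySem.Set.add s]
    rfl
  · intro acc j hj
    obtain ⟨h0, hlt⟩ := (PySem.List.mem_pyRange_one).mp hj
    have hjr : j < (r.length : Int) := by exact_mod_cast lt_of_lt_of_le hlt (by exact_mod_cast hc)
    have hjt : j < ((r.take c).length : Int) := by rw [htlen]; exact hlt
    rw [PySem.List.pyGetD_eq_getElem r 0 h0 hjr, PySem.List.pyGetD_eq_getElem (r.take c) 0 h0 hjt]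
    congr 1
    exact (List.getElem_take).symm

-- B's inner comprehension over range(cols) on a row of length ≥ cols collects row[:cols]
theorem inner_map_eq (r : List Int) (c : Nat) (hc : c ≤ r.length) :
    (PySem.List.pyRange 0 (c : Int) 1).map (fun j => PySem.List.pyGetD r j 0) = r.take c := by
  have htlen : (r.take c).length = c := by simp [List.length_take]; omega
  rw [List.map_congr_left (g := fun j => PySem.List.pyGetD (r.take c) j 0)]
  · have hcast : (c : Int) = ((r.take c).length : Int) := by rw [htlen]
    rw [hcast, PySem.List.map_pyGetD_pyRange_zero']
  · intro j hj
    obtain ⟨h0, hlt⟩ := (PySem.List.mem_pyRange_one).mp hj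
    have hjr : j < (r.length : Int) := by exact_mod_cast lt_of_lt_of_le hlt (by exact_mod_cast hc)
    have hjt : j < ((r.take c).length : Int) := by rw [htlen]; exact hlt
    rw [PySem.List.pyGetD_eq_getElem r 0 h0 hjr, PySem.List.pyGetD_eq_getElem (r.take c) 0 h0 hjt]
    exact (List.getElem_take).symm

-- the adjacent-pairs scan is the chain predicate
theorem zip_tail_all_lt (l : List Int) :
    ((l.zip (l.drop 1)).all (fun p => decide (p.1 < p.2))) = true ↔ List.IsChain (· < ·) l := by
  induction l with
  | nil => simp
  | cons x xs ih =>
      cases xs with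
      | nil => simp
      | cons y ys =>
          simp only [List.drop_succ_cons, List.drop_zero, List.zip_cons_cons, List.all_cons,
            List.isChain_cons_cons, Bool.and_eq_true, decide_eq_true_eq] at ih ⊢
          rw [ih]

-- on a (≤)-sorted list, adjacent strict increase is the same as being duplicate-free
theorem pairwise_lt_iff_nodup (l : List Int) (hs : l.Pairwise (· ≤ ·)) :
    List.IsChain (· < ·) l ↔ l.Nodup := by
  rw [List.isChain_iff_pairwise]
  constructor
  · exact fun h => h.imp ne_of_lt
  · intro hn
    exact (hs.and hn).imp (fun h => lt_of_le_of_ne h.1 h.2)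

-- ordered dedup is strictly shorter when there is a duplicate
theorem length_ofList_lt_of_not_nodup (xs : List Int) (h : ¬ xs.Nodup) :
    (PySem.Set.ofList xs).length < xs.length := by
  induction xs with
  | nil => exact absurd List.nodup_nil h
  | cons x xs ih =>
      rw [PySem.Set.ofList_cons]
      simp only [List.length_cons]
      by_cases hx : x ∈ xs
      · have hmem : x ∈ PySem.Set.ofList xs := (PySem.Set.mem_ofList _ _).mpr hx
        have hlt : ((PySem.Set.ofList xs).discard x).length < (PySem.Set.ofList xs).length := by
          unfold PySem.Set.discard
          exact List.length_filter_lt_length_iff_exists.mpr ⟨x, hmem, by simp⟩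
        have := PySem.Set.length_ofList_le xs
        omega
      · have hx2 : ¬ xs.Nodup := fun hn => h (List.nodup_cons.mpr ⟨hx, hn⟩)
        have hle : ((PySem.Set.ofList xs).discard x).length ≤ (PySem.Set.ofList xs).length := by
          unfold PySem.Set.discard
          exact List.length_filter_le _ _
        have := ih hx2
        omega

-- the flattening of the truncated rows has rows*cols elements
theorem length_flatten_take (a : List (List Int)) (c : Nat) (h : ∀ r ∈ a, c ≤ r.length) :
    (a.map (fun r => r.take c)).flatten.length = a.length * c := by
  rw [List.length_flatten, List.map_map]
  rw [List.map_congr_left (g := fun _ => c) (fun r hr => by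
    simp only [Function.comp_apply, List.length_take]
    exact Nat.min_eq_left (h r hr))]
  simp [List.map_const', Nat.mul_comm]

-- ===== VERDICT (by name: the statement is the Claim_ definition above) =====
theorem checkDuplicity2_spec : Claim_equal_checkDuplicity2 := by
  intro a _ hpre
  obtain ⟨hne, hall⟩ := hpre
  obtain ⟨r0, rest, rfl⟩ := List.exists_cons_of_ne_nil hne
  show checkDuplicity2 (r0 :: rest) = checkDuplicity2_alt (r0 :: rest)
  simp only [List.headD_cons] at hall
  set F : List Int := ((r0 :: rest).map (fun r => r.take r0.length)).flatten with hF
  have hget : (PySem.List.pyGet? (r0 :: rest) 0).getD [] = r0 := by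
    simp [PySem.List.pyGet?, PySem.List.pyIdx?]
  -- A's resultset is the ordered dedup of the truncated flattening
  have hset :
      (PySem.List.pyRange 0 (PySem.List.len (r0 :: rest)) 1).foldl (fun s row =>
        (PySem.List.pyRange 0 (PySem.List.len r0) 1).foldl (fun s col =>
          PySem.Set.add s (PySem.List.pyGetD (PySem.List.pyGetD (r0 :: rest) row []) col 0)) s)
        PySem.Set.empty = PySem.Set.ofList F := by
    simp only [PySem.List.len_eq]
    rw [PySem.List.foldl_pyRange_zero_pyGetD' (r0 :: rest) []
      (fun s r => (PySem.List.pyRange 0 ((r0.length : Int)) 1).foldl (fun s col =>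
        PySem.Set.add s (PySem.List.pyGetD r col 0)) s) PySem.Set.empty]
    rw [PySem.List.foldl_congr_mem (r0 :: rest) _ (fun s r => PySem.Set.update s (r.take r0.length))
      PySem.Set.empty (fun s r hr => inner_fold_eq r r0.length (hall r hr) s)]
    have : (r0 :: rest).foldl (fun s r => PySem.Set.update s (r.take r0.length)) PySem.Set.empty =
        ((r0 :: rest).map (fun r => r.take r0.length)).foldl
          (fun s r => PySem.Set.update s r) PySem.Set.empty := by
      rw [List.foldl_map]
    rw [this, foldl_update_flatten, ← hF]
    exact PySem.Set.update_nil_left F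
  -- unfold A around the computed set
  have hA : checkDuplicity2 (r0 :: rest) =
      (if PySem.Set.contains (PySem.Set.ofList F) 0 then false
       else if PySem.Set.len (PySem.Set.ofList F) =
           (PySem.List.len (r0 :: rest)) * (PySem.List.len r0) then true else false) := by
    simp only [checkDuplicity2, hget]
    rw [hset]
  -- B's value list is sorted F
  have hvals :
      ((r0 :: rest).flatMap (fun row =>
        (PySem.List.pyRange 0 (PySem.List.len r0) 1).map (fun c => PySem.List.pyGetD row c 0)))
      = F := by
    simp only [PySem.List.len_eq, List.flatMap_def]
    rw [List.map_congr_left (fun r hr => inner_map_eq r r0.length (hall r hr))]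
  -- unfold B: it decides "sorted F is 0-free and adjacent-increasing"
  set vals : List Int := PySem.List.sorted F (fun x => x) false with hv
  have hB : checkDuplicity2_alt (r0 :: rest) =
      ((! vals.contains 0) &&
        (vals.zip (PySem.List.slice vals (some 1) none)).all (fun p => decide (p.1 < p.2))) := by
    simp only [checkDuplicity2_alt, hget]
    rw [hvals]
  rw [hA, hB]
  -- characterize B as decide (F.Nodup ∧ 0 ∉ F)
  have hslice : PySem.List.slice vals (some 1) none = vals.drop 1 := by
    simp [PySem.List.slice_from]
  have hperm : vals.Perm F := PySem.List.sorted_perm F (fun x => x) false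
  have hBchar : ((! vals.contains 0) &&
        (vals.zip (PySem.List.slice vals (some 1) none)).all (fun p => decide (p.1 < p.2)))
      = decide (F.Nodup ∧ (0 : Int) ∉ F) := by
    rw [hslice]
    have hsorted : vals.Pairwise (· ≤ ·) := by
      have := PySem.List.sorted_pairwise F (fun x => x)
      simpa using this
    have hchain : ((vals.zip (vals.drop 1)).all (fun p => decide (p.1 < p.2))) = true ↔ F.Nodup := by
      rw [zip_tail_all_lt vals, pairwise_lt_iff_nodup vals hsorted]
      exact hperm.nodup_iff
    have hmem : vals.contains 0 = decide ((0 : Int) ∈ F) := by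
      simp [hperm.mem_iff]
    rw [hmem]
    by_cases hz : (0 : Int) ∈ F
    · simp [hz]
    · by_cases hn : F.Nodup
      · rw [hchain.mpr hn]
        simp [hz, hn]
      · have : ¬ ((vals.zip (vals.drop 1)).all (fun p => decide (p.1 < p.2))) = true :=
          fun h => hn (hchain.mp h)
        rw [Bool.not_eq_true] at this
        rw [this]
        simp [hz, hn]
  rw [hBchar]
  have hlenF : F.length = (r0 :: rest).length * r0.length :=
    length_flatten_take _ _ hall
  by_cases hz : (0 : Int) ∈ F
  · have : PySem.Set.contains (PySem.Set.ofList F) 0 = true := by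
      rw [PySem.Set.contains_iff]
      exact (PySem.Set.mem_ofList _ _).mpr hz
    simp [this, hz]
  · rw [if_neg (by simp [PySem.Set.contains_iff, PySem.Set.mem_ofList, hz])]
    by_cases hn : F.Nodup
    · rw [if_pos, decide_eq_true (by exact ⟨hn, hz⟩)]
      rw [PySem.Set.ofList_eq_self_of_nodup F hn]
      simp only [PySem.Set.len, PySem.List.len_eq, hlenF]
      push_cast
      ring
    · rw [if_neg, decide_eq_false (by rintro ⟨h, -⟩; exact hn h)]
      have hlt := length_ofList_lt_of_not_nodup F hn
      simp only [PySem.Set.len, PySem.List.len_eq]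
      intro hEq
      have : ((PySem.Set.ofList F).length : Int) = (F.length : Int) := by
        rw [hEq]; push_cast [hlenF]; ring
      omega
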